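-- pv_equiv track=rewrite | github.com/haimaindi/XeenapsProto | api/extract.py | get_json_or_vtt_url
-- ===== SOURCE A (Python) =====
-- def get_json_or_vtt_url(sub_list):
--     for sub in sub_list:
--         if sub.get('ext') == 'json3':
--             return sub.get('url')
--     for sub in sub_list:
--         if sub.get('ext') == 'vtt':
--             return sub.get('url')
--     return sub_list[0].get('url') if sub_list else None
-- ===== SOURCE B (Python) =====
-- def get_json_or_vtt_url(sub_list):
--     found = False
--     vtt_url = None
--     for sub in sub_list:
--         ext = sub.get('ext')
--         if ext == 'json3':
--             return sub.get('url')
--         if not found and ext == 'vtt':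
--             found = True
--             vtt_url = sub.get('url')
--     if found:
--         return vtt_url
--     return sub_list[0].get('url') if sub_list else None
-- ===== Notes on version B (the rewrite author's own statement) =====
-- stated objective: alternative
-- what changed: replaces A's two sequential priority scans (json3 pass, then vtt pass, then fallback) by a single pass that returns immediately on json3 while remembering the first vtt url under a found-flag
import Mathlib
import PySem

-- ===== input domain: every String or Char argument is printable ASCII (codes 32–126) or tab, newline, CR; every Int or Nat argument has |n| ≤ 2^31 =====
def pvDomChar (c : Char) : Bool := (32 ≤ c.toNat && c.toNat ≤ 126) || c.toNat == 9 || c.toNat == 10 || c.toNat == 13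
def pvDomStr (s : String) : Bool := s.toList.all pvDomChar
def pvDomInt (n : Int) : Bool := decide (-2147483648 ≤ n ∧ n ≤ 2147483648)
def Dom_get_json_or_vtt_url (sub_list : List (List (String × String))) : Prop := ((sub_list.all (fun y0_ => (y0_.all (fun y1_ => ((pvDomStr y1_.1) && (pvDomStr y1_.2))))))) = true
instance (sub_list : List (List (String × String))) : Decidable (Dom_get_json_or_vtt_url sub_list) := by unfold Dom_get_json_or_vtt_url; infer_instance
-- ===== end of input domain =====

-- B makes one pass (return on json3, remember first vtt url under a found-flag) instead of A's two sequential scans; same cost, different decomposition.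

-- dict.get(k): first-match lookup in the association list (shared primitive, not algorithmic)
def pvGet (d : List (String × String)) (k : String) : Option String :=
  match d with
  | [] => none
  | (k', v) :: rest => if k' == k then some v else pvGet rest k

-- ===== PORT A =====
-- first loop: 'return sub.get("url")' on ext == 'json3'; some u = early return (u may be none)
def aLoop1 (sub_list : List (List (String × String))) : Option (Option String) :=
  match sub_list with
  | [] => none
  | sub :: rest =>
    if pvGet sub "ext" == some "json3" then some (pvGet sub "url") else aLoop1 rest

-- second loop: same for ext == 'vtt'
def aLoop2 (sub_list : List (List (String × String))) : Option (Option String) :=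
  match sub_list with
  | [] => none
  | sub :: rest =>
    if pvGet sub "ext" == some "vtt" then some (pvGet sub "url") else aLoop2 rest

def get_json_or_vtt_url (sub_list : List (List (String × String))) : Option String :=
  match aLoop1 sub_list with
  | some u => u
  | none =>
    match aLoop2 sub_list with
    | some u => u
    | none =>
      match sub_list with
      | [] => none
      | sub :: _ => pvGet sub "url"

-- ===== PORT B =====
-- one pass: .inl u = early return (json3); .inr (found, vtt_url) = loop finished
def bLoop (sub_list : List (List (String × String))) (found : Bool) (vtt_url : Option String) :
    (Option String) ⊕ (Bool × Option String) :=
  match sub_list with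
  | [] => Sum.inr (found, vtt_url)
  | sub :: rest =>
    let ext := pvGet sub "ext"
    if ext == some "json3" then Sum.inl (pvGet sub "url")
    else if !found && (ext == some "vtt") then bLoop rest true (pvGet sub "url")
    else bLoop rest found vtt_url

def get_json_or_vtt_url_alt (sub_list : List (List (String × String))) : Option String :=
  match bLoop sub_list false none with
  | Sum.inl u => u
  | Sum.inr (true, vtt_url) => vtt_url
  | Sum.inr (false, _) =>
    match sub_list with
    | [] => none
    | sub :: _ => pvGet sub "url"

-- ===== PRECONDITION & SPEC =====
def Spec_get_json_or_vtt_url (sub_list : List (List (String × String))) (out : Option String) : Prop := out = get_json_or_vtt_url_alt sub_list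
instance (sub_list : List (List (String × String))) (out : Option String) : Decidable (Spec_get_json_or_vtt_url sub_list out) := by unfold Spec_get_json_or_vtt_url; infer_instance

-- ===== CLAIM (what is proved, stated in full; the proofs are below) =====
def Claim_equal_get_json_or_vtt_url : Prop := ∀ (sub_list : List (List (String × String))), Dom_get_json_or_vtt_url sub_list → Spec_get_json_or_vtt_url sub_list (get_json_or_vtt_url sub_list)

-- ===== LEMMAS AND PROOFS =====
-- the one-pass loop, characterised by the two scans of A
theorem bLoop_eq (sub_list : List (List (String × String))) :
    ∀ (found : Bool) (vtt_url : Option String),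
    bLoop sub_list found vtt_url =
      match aLoop1 sub_list with
      | some u => Sum.inl u
      | none =>
        if found then Sum.inr (true, vtt_url)
        else
          match aLoop2 sub_list with
          | some u => Sum.inr (true, u)
          | none => Sum.inr (false, vtt_url) := by
  induction sub_list with
  | nil =>
    intro found vtt_url
    cases found <;> simp [bLoop, aLoop1, aLoop2]
  | cons sub rest ih =>
    intro found vtt_url
    simp only [bLoop, aLoop1, aLoop2]
    by_cases hj : (pvGet sub "ext" == some "json3") = true
    · simp [hj]
    · simp only [hj, Bool.false_eq_true, if_false]
      cases found with
      | true => simp only [Bool.not_true, Bool.false_and, Bool.false_eq_true, if_false]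
                rw [ih true vtt_url]
                cases aLoop1 rest <;> simp
      | false =>
        by_cases hv : (pvGet sub "ext" == some "vtt") = true
        · simp only [Bool.not_false, Bool.true_and, hv, if_true]
          rw [ih true (pvGet sub "url")]
          cases aLoop1 rest <;> simp
        · simp only [Bool.not_false, Bool.true_and, hv, Bool.false_eq_true, if_false]
          rw [ih false vtt_url]
          cases aLoop1 rest
          · cases aLoop2 rest <;> simp
          · simp

theorem get_json_or_vtt_url_eq_alt (sub_list : List (List (String × String))) :
    get_json_or_vtt_url sub_list = get_json_or_vtt_url_alt sub_list := by
  unfold get_json_or_vtt_url get_json_or_vtt_url_alt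
  rw [bLoop_eq]
  cases h1 : aLoop1 sub_list with
  | some u => simp
  | none =>
    cases h2 : aLoop2 sub_list with
    | some u => simp
    | none => cases sub_list <;> simp

-- ===== VERDICT (by name: the statement is the Claim_ definition above) =====
theorem get_json_or_vtt_url_spec : Claim_equal_get_json_or_vtt_url := by
  intro sub_list _
  exact (get_json_or_vtt_url_eq_alt sub_list).symm ▸ rfl
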